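-- pv_equiv track=rewrite | github.com/nazanaza2970/WASM_cloak_browser_fingerprinting | Code/myDynamicDetector/files/feature_extraction.py | extract_ground_truth
-- ===== SOURCE A (Python) =====
-- def extract_ground_truth(api_calls):
--     """Determines fingerprinting behavior based on API call patterns."""
--     is_canvas_1, is_canvas_2, is_canvas_3, is_canvas_4 = False, False, False, True
--     is_webrtc_1, is_webrtc_2 = False, False
--     canvasfont_fonts, canvasfont_measuretext = set(), 0
--     is_audio = False
--     for api_call in api_calls:
--         symbol_text = api_call['symbol'].strip().lower()
--         if 'canvasrenderingcontext2d.filltext' in symbol_text or 'canvasrenderingcontext2d.stroketext' in symbol_text: is_canvas_1 = True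
--         elif 'canvasrenderingcontext2d.fillstyle' in symbol_text or 'canvasrenderingcontext2d.strokestyle' in symbol_text: is_canvas_2 = True
--         elif 'htmlcanvaselement.todataurl' in symbol_text: is_canvas_3 = True
--         elif symbol_text in ('canvasrenderingcontext2d.save', 'canvasrenderingcontext2d.restore', 'canvasrenderingcontext2d.addeventlistener'): is_canvas_4 = False
--         elif symbol_text in ('rtcpeerconnection.createdatachannel', 'rtcpeerconnection.createoffer'): is_webrtc_1 = True
--         elif symbol_text in ('rtcpeerconnection.onicecandidate', 'rtcpeerconnection.localdescription'): is_webrtc_2 = True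
--         elif 'canvasrenderingcontext2d.font' in symbol_text: canvasfont_fonts.add(api_call.get('value'))
--         elif 'canvasrenderingcontext2d.measuretext' in symbol_text: canvasfont_measuretext += 1
--         elif symbol_text in ('offlineaudiocontext.createoscillator', 'offlineaudiocontext.createdynamicscompressor', 'offlineaudiocontext.destination', 'offlineaudiocontext.startrendering', 'offlineaudiocontext.oncomplete'): is_audio = True
--     is_canvas = is_canvas_1 and is_canvas_2 and is_canvas_3 and is_canvas_4
--     is_webrtc = is_webrtc_1 and is_webrtc_2
--     is_canvasfont = len(canvasfont_fonts) > 20 and canvasfont_measuretext > 20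
--     is_fp = is_canvas or is_webrtc or is_canvasfont or is_audio
--     return {'is_canvas': is_canvas, 'is_webrtc': is_webrtc, 'is_canvasfont': is_canvasfont, 'is_audio': is_audio, 'is_fingerprinting': is_fp}
-- ===== SOURCE B (Python) =====
-- _TAG_CANVAS_TEXT = 'text'
-- _TAG_CANVAS_STYLE = 'style'
-- _TAG_CANVAS_URL = 'todataurl'
-- _TAG_CANVAS_STATE = 'state'
-- _TAG_RTC_CREATE = 'rtc_create'
-- _TAG_RTC_ICE = 'rtc_ice'
-- _TAG_FONT = 'font'
-- _TAG_MEASURE = 'measure'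
-- _TAG_AUDIO = 'audio'
-- _TAG_OTHER = 'other'
--
--
-- def _classify(symbol_text):
--     """Route a normalized symbol to exactly one category (same precedence as the original elif chain)."""
--     if 'canvasrenderingcontext2d.filltext' in symbol_text or 'canvasrenderingcontext2d.stroketext' in symbol_text:
--         return _TAG_CANVAS_TEXT
--     if 'canvasrenderingcontext2d.fillstyle' in symbol_text or 'canvasrenderingcontext2d.strokestyle' in symbol_text:
--         return _TAG_CANVAS_STYLE
--     if 'htmlcanvaselement.todataurl' in symbol_text:
--         return _TAG_CANVAS_URL
--     if symbol_text in ('canvasrenderingcontext2d.save', 'canvasrenderingcontext2d.restore', 'canvasrenderingcontext2d.addeventlistener'):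
--         return _TAG_CANVAS_STATE
--     if symbol_text in ('rtcpeerconnection.createdatachannel', 'rtcpeerconnection.createoffer'):
--         return _TAG_RTC_CREATE
--     if symbol_text in ('rtcpeerconnection.onicecandidate', 'rtcpeerconnection.localdescription'):
--         return _TAG_RTC_ICE
--     if 'canvasrenderingcontext2d.font' in symbol_text:
--         return _TAG_FONT
--     if 'canvasrenderingcontext2d.measuretext' in symbol_text:
--         return _TAG_MEASURE
--     if symbol_text in ('offlineaudiocontext.createoscillator', 'offlineaudiocontext.createdynamicscompressor', 'offlineaudiocontext.destination', 'offlineaudiocontext.startrendering', 'offlineaudiocontext.oncomplete'):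
--         return _TAG_AUDIO
--     return _TAG_OTHER
--
--
-- def extract_ground_truth(api_calls):
--     """Determines fingerprinting behavior based on API call patterns."""
--     tagged = [(_classify(c['symbol'].strip().lower()), c.get('value')) for c in api_calls]
--     tags = {t for t, _ in tagged}
--     fonts = {v for t, v in tagged if t == _TAG_FONT}
--     measure = sum(1 for t, _ in tagged if t == _TAG_MEASURE)
--     is_canvas = (_TAG_CANVAS_TEXT in tags and _TAG_CANVAS_STYLE in tags
--                  and _TAG_CANVAS_URL in tags and _TAG_CANVAS_STATE not in tags)
--     is_webrtc = _TAG_RTC_CREATE in tags and _TAG_RTC_ICE in tags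
--     is_canvasfont = len(fonts) > 20 and measure > 20
--     is_audio = _TAG_AUDIO in tags
--     is_fp = is_canvas or is_webrtc or is_canvasfont or is_audio
--     return {'is_canvas': is_canvas, 'is_webrtc': is_webrtc, 'is_canvasfont': is_canvasfont, 'is_audio': is_audio, 'is_fingerprinting': is_fp}
-- ===== Notes on version B (the rewrite author's own statement) =====
-- stated objective: alternative
-- what changed: Instead of mutating nine flags inside the loop, B classifies each call once into a single category tag (same elif precedence), collects the tag set, the font-value set and the measuretext count in one comprehension pass, and then computes every predicate by membership/size tests on that collected evidence.
import Mathlib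
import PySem

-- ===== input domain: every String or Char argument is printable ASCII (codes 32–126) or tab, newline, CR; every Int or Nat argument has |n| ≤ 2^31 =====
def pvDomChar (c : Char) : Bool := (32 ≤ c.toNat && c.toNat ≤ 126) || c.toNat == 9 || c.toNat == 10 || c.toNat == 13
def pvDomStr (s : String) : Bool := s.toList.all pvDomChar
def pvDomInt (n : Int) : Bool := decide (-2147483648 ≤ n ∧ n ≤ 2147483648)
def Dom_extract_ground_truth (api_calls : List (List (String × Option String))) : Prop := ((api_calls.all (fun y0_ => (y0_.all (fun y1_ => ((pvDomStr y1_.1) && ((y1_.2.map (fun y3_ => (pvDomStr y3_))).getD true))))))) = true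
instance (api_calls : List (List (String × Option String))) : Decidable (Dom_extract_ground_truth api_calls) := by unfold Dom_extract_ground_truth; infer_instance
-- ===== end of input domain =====

-- B is an alternative decomposition of A: one classify-and-collect pass over the calls followed by
-- membership/size tests on the collected evidence, instead of A's nine mutable flags in one loop.

-- shared helpers: both Pythons read api_call['symbol'] (Pre_ guarantees the key is present and not None)
-- and normalize it with .strip().lower(); both read api_call.get('value').
def pvSymbol (call : List (String × Option String)) : String :=
  match PySem.Dict.get? ⟨call⟩ "symbol" with
  | some (some s) => s
  | _ => ""   -- unreachable under Pre_extract_ground_truth (KeyError / None.strip())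

def pvValue (call : List (String × Option String)) : Option String :=
  match PySem.Dict.get? ⟨call⟩ "value" with
  | some v => v
  | none => none   -- dict.get returns None when the key is absent

def pvNorm (s : String) : String := PySem.Str.lower (PySem.Str.strip s)

-- ===== PORT A =====
-- loop state: (c1, c2, c3, c4, w1, w2, fonts, measuretext, audio)
def pvStateA : Type := Bool × Bool × Bool × Bool × Bool × Bool × PySem.Set (Option String) × Int × Bool

def pvStepA (st : pvStateA) (call : List (String × Option String)) : pvStateA :=
  match st with
  | (c1, c2, c3, c4, w1, w2, fonts, mt, aud) =>
    let t := pvNorm (pvSymbol call)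
    if PySem.Str.isIn "canvasrenderingcontext2d.filltext" t || PySem.Str.isIn "canvasrenderingcontext2d.stroketext" t then
      (true, c2, c3, c4, w1, w2, fonts, mt, aud)
    else if PySem.Str.isIn "canvasrenderingcontext2d.fillstyle" t || PySem.Str.isIn "canvasrenderingcontext2d.strokestyle" t then
      (c1, true, c3, c4, w1, w2, fonts, mt, aud)
    else if PySem.Str.isIn "htmlcanvaselement.todataurl" t then
      (c1, c2, true, c4, w1, w2, fonts, mt, aud)
    else if t == "canvasrenderingcontext2d.save" || t == "canvasrenderingcontext2d.restore" || t == "canvasrenderingcontext2d.addeventlistener" then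
      (c1, c2, c3, false, w1, w2, fonts, mt, aud)
    else if t == "rtcpeerconnection.createdatachannel" || t == "rtcpeerconnection.createoffer" then
      (c1, c2, c3, c4, true, w2, fonts, mt, aud)
    else if t == "rtcpeerconnection.onicecandidate" || t == "rtcpeerconnection.localdescription" then
      (c1, c2, c3, c4, w1, true, fonts, mt, aud)
    else if PySem.Str.isIn "canvasrenderingcontext2d.font" t then
      (c1, c2, c3, c4, w1, w2, PySem.Set.add fonts (pvValue call), mt, aud)
    else if PySem.Str.isIn "canvasrenderingcontext2d.measuretext" t then
      (c1, c2, c3, c4, w1, w2, fonts, mt + 1, aud)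
    else if t == "offlineaudiocontext.createoscillator" || t == "offlineaudiocontext.createdynamicscompressor" || t == "offlineaudiocontext.destination" || t == "offlineaudiocontext.startrendering" || t == "offlineaudiocontext.oncomplete" then
      (c1, c2, c3, c4, w1, w2, fonts, mt, true)
    else
      (c1, c2, c3, c4, w1, w2, fonts, mt, aud)

def extract_ground_truth (api_calls : List (List (String × Option String))) : List (String × Bool) :=
  match api_calls.foldl pvStepA (false, false, false, true, false, false, (PySem.Set.empty : PySem.Set (Option String)), (0 : Int), false) with
  | (c1, c2, c3, c4, w1, w2, fonts, mt, aud) =>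
    let is_canvas := c1 && c2 && c3 && c4
    let is_webrtc := w1 && w2
    let is_canvasfont := decide (20 < PySem.Set.len fonts) && decide (20 < mt)
    let is_fp := is_canvas || is_webrtc || is_canvasfont || aud
    [("is_canvas", is_canvas), ("is_webrtc", is_webrtc), ("is_canvasfont", is_canvasfont), ("is_audio", aud), ("is_fingerprinting", is_fp)]

-- ===== PORT B =====
def pvClassify (t : String) : String :=
  if PySem.Str.isIn "canvasrenderingcontext2d.filltext" t || PySem.Str.isIn "canvasrenderingcontext2d.stroketext" t then "text"
  else if PySem.Str.isIn "canvasrenderingcontext2d.fillstyle" t || PySem.Str.isIn "canvasrenderingcontext2d.strokestyle" t then "style"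
  else if PySem.Str.isIn "htmlcanvaselement.todataurl" t then "todataurl"
  else if t == "canvasrenderingcontext2d.save" || t == "canvasrenderingcontext2d.restore" || t == "canvasrenderingcontext2d.addeventlistener" then "state"
  else if t == "rtcpeerconnection.createdatachannel" || t == "rtcpeerconnection.createoffer" then "rtc_create"
  else if t == "rtcpeerconnection.onicecandidate" || t == "rtcpeerconnection.localdescription" then "rtc_ice"
  else if PySem.Str.isIn "canvasrenderingcontext2d.font" t then "font"
  else if PySem.Str.isIn "canvasrenderingcontext2d.measuretext" t then "measure"
  else if t == "offlineaudiocontext.createoscillator" || t == "offlineaudiocontext.createdynamicscompressor" || t == "offlineaudiocontext.destination" || t == "offlineaudiocontext.startrendering" || t == "offlineaudiocontext.oncomplete" then "audio"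
  else "other"

-- the tag-and-value pair B's comprehension computes for one call
def pvTag (c : List (String × Option String)) : String := pvClassify (pvNorm (pvSymbol c))

def extract_ground_truth_alt (api_calls : List (List (String × Option String))) : List (String × Bool) :=
  let tagged := api_calls.map (fun c => (pvTag c, pvValue c))
  let tags : PySem.Set String := PySem.Set.ofList (tagged.map (fun p => p.1))
  let fonts : PySem.Set (Option String) := PySem.Set.ofList (tagged.filterMap (fun p => if p.1 == "font" then some p.2 else none))
  let measure : Int := ((tagged.filter (fun p => p.1 == "measure")).length : Int)
  let is_canvas := PySem.Set.contains tags "text" && PySem.Set.contains tags "style" && PySem.Set.contains tags "todataurl" && !(PySem.Set.contains tags "state")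
  let is_webrtc := PySem.Set.contains tags "rtc_create" && PySem.Set.contains tags "rtc_ice"
  let is_canvasfont := decide (20 < PySem.Set.len fonts) && decide (20 < measure)
  let is_audio := PySem.Set.contains tags "audio"
  let is_fp := is_canvas || is_webrtc || is_canvasfont || is_audio
  [("is_canvas", is_canvas), ("is_webrtc", is_webrtc), ("is_canvasfont", is_canvasfont), ("is_audio", is_audio), ("is_fingerprinting", is_fp)]

-- ===== PRECONDITION & SPEC =====
-- Pre_ excludes inputs where Python A raises: a call dict without a 'symbol' key (KeyError) or whose
-- 'symbol' value is None (.strip() on None raises AttributeError).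
def Pre_extract_ground_truth (api_calls : List (List (String × Option String))) : Prop :=
  (api_calls.all (fun call =>
    match PySem.Dict.get? ⟨call⟩ "symbol" with
    | some (some _) => true
    | _ => false)) = true
instance (api_calls : List (List (String × Option String))) : Decidable (Pre_extract_ground_truth api_calls) := by unfold Pre_extract_ground_truth; infer_instance

def pvWitness_extract_ground_truth : (List (List (String × Option String))) :=
  [[("symbol", some " CanvasRenderingContext2D.fillText "), ("value", some "x")],
   [("symbol", some "htmlcanvaselement.todataurl")]]

def Spec_extract_ground_truth (api_calls : List (List (String × Option String))) (out : List (String × Bool)) : Prop := out = extract_ground_truth_alt api_calls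
instance (api_calls : List (List (String × Option String))) (out : List (String × Bool)) : Decidable (Spec_extract_ground_truth api_calls out) := by unfold Spec_extract_ground_truth; infer_instance

-- ===== CLAIM (what is proved, stated in full; the proofs are below) =====
def Claim_equal_extract_ground_truth : Prop := ∀ (api_calls : List (List (String × Option String))), Dom_extract_ground_truth api_calls → Pre_extract_ground_truth api_calls → Spec_extract_ground_truth api_calls (extract_ground_truth api_calls)

-- ===== LEMMAS AND PROOFS =====

-- A's step, reformulated as a dispatch on B's tag
def pvApplyTag (st : pvStateA) (t : String) (v : Option String) : pvStateA :=
  match st with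
  | (c1, c2, c3, c4, w1, w2, fonts, mt, aud) =>
    if t == "text" then (true, c2, c3, c4, w1, w2, fonts, mt, aud)
    else if t == "style" then (c1, true, c3, c4, w1, w2, fonts, mt, aud)
    else if t == "todataurl" then (c1, c2, true, c4, w1, w2, fonts, mt, aud)
    else if t == "state" then (c1, c2, c3, false, w1, w2, fonts, mt, aud)
    else if t == "rtc_create" then (c1, c2, c3, c4, true, w2, fonts, mt, aud)
    else if t == "rtc_ice" then (c1, c2, c3, c4, w1, true, fonts, mt, aud)
    else if t == "font" then (c1, c2, c3, c4, w1, w2, PySem.Set.add fonts v, mt, aud)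
    else if t == "measure" then (c1, c2, c3, c4, w1, w2, fonts, mt + 1, aud)
    else if t == "audio" then (c1, c2, c3, c4, w1, w2, fonts, mt, true)
    else (c1, c2, c3, c4, w1, w2, fonts, mt, aud)

theorem pvStepA_eq_applyTag (st : pvStateA) (c : List (String × Option String)) :
    pvStepA st c = pvApplyTag st (pvTag c) (pvValue c) := by
  obtain ⟨c1, c2, c3, c4, w1, w2, fonts, mt, aud⟩ := st
  simp only [pvStepA, pvTag, pvClassify]
  split_ifs <;> rfl

theorem pvFoldA_inv (xs : List (List (String × Option String)))
    (c1 c2 c3 c4 w1 w2 : Bool) (F : PySem.Set (Option String)) (mt : Int) (aud : Bool) :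
    xs.foldl pvStepA (c1, c2, c3, c4, w1, w2, F, mt, aud) =
      (c1 || xs.any (fun c => pvTag c == "text"),
       c2 || xs.any (fun c => pvTag c == "style"),
       c3 || xs.any (fun c => pvTag c == "todataurl"),
       c4 && !(xs.any (fun c => pvTag c == "state")),
       w1 || xs.any (fun c => pvTag c == "rtc_create"),
       w2 || xs.any (fun c => pvTag c == "rtc_ice"),
       (xs.filterMap (fun c => if pvTag c == "font" then some (pvValue c) else none)).foldl PySem.Set.add F,
       mt + ((xs.filter (fun c => pvTag c == "measure")).length : Int),
       aud || xs.any (fun c => pvTag c == "audio")) := by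
  induction xs generalizing c1 c2 c3 c4 w1 w2 F mt aud with
  | nil => simp
  | cons x xs ih =>
    rw [List.foldl_cons, pvStepA_eq_applyTag]
    unfold pvApplyTag
    split_ifs with h1 h2 h3 h4 h5 h6 h7 h8 h9 <;>
      (rw [ih]; clear ih; simp_all [Bool.beq_eq_decide_eq, Int.add_comm, Int.add_assoc])

theorem pvContains_ofList {α : Type} [BEq α] [LawfulBEq α] (l : List α) (a : α) :
    PySem.Set.contains (PySem.Set.ofList l) a = l.contains a := by
  by_cases h : a ∈ l <;> simp [PySem.Set.contains, PySem.Set.mem_ofList, h]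

theorem pvContains_map {α : Type} (xs : List α) (f : α → String) (s : String) :
    PySem.Set.contains (PySem.Set.ofList (xs.map f)) s = xs.any (fun c => f c == s) := by
  rw [pvContains_ofList, ← List.any_beq', List.any_map, Function.comp_def]

-- B-side aggregate bridges (specific shapes of B's comprehension over (tag, value) pairs)
theorem pvMapFst {β γ : Type} (t : β → String) (v : β → γ) (xs : List β) :
    (xs.map (fun c => (t c, v c))).map (fun p => p.1) = xs.map t := by
  induction xs with
  | nil => rfl
  | cons x l ih => simp only [List.map_cons, ih]

theorem pvFonts {β γ : Type} (t : β → String) (v : β → γ) (xs : List β) :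
    (xs.map (fun c => (t c, v c))).filterMap (fun p => if p.1 == "font" then some p.2 else none)
      = xs.filterMap (fun c => if t c == "font" then some (v c) else none) := by
  induction xs with
  | nil => rfl
  | cons x l ih => simp only [List.map_cons, List.filterMap_cons, ih]

theorem pvMeas {β γ : Type} (t : β → String) (v : β → γ) (xs : List β) :
    ((xs.map (fun c => (t c, v c))).filter (fun p => p.1 == "measure")).length
      = (xs.filter (fun c => t c == "measure")).length := by
  induction xs with
  | nil => rfl
  | cons x l ih =>
    simp only [List.map_cons, List.filter_cons]
    by_cases h : (t x == "measure") = true <;> simp [h, ih]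

-- ===== VERDICT (by name: the statement is the Claim_ definition above) =====
theorem extract_ground_truth_spec : Claim_equal_extract_ground_truth := by
  intro api_calls _ _
  simp only [Spec_extract_ground_truth, extract_ground_truth, extract_ground_truth_alt]
  rw [pvFoldA_inv]
  dsimp only
  rw [pvMapFst, pvFonts, pvMeas]
  simp only [pvContains_map]
  simp only [PySem.Set.ofList_eq_foldl, PySem.Set.empty]
  simp only [Bool.false_or, Bool.true_and, Int.zero_add]
  rfl
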